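-- pv_equiv track=rewrite | github.com/Heuriskein/arkle | src/solver.py | compare_arr
-- ===== SOURCE A (Python) =====
-- def compare_arr(g, t):
--     t_set = set(t)
--     overlap = [x for x in g if x in t_set]
--     if len(overlap) == len(t) and len(g) == len(t):
--         return 'exact'
--     if overlap:
--         return 'partial'
--     return 'none'
-- ===== SOURCE B (Python) =====
-- def compare_arr(g, t):
--     gs = sorted(set(g))
--     ts = sorted(set(t))
--     i = j = common = 0
--     while i < len(gs) and j < len(ts):
--         if gs[i] < ts[j]:
--             i += 1
--         elif ts[j] < gs[i]:
--             j += 1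
--         else:
--             common += 1
--             i += 1
--             j += 1
--     if len(g) == len(t) and common == len(gs):
--         return 'exact'
--     if common > 0:
--         return 'partial'
--     return 'none'
-- ===== Notes on version B (the rewrite author's own statement) =====
-- stated objective: alternative
-- what changed: Replaces A's hash-set membership filter with a sort-then-merge two-pointer scan: both inputs are deduplicated and sorted, and a single merge walk counts common elements, from which exact/partial/none is decided arithmetically.
import Mathlib
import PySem

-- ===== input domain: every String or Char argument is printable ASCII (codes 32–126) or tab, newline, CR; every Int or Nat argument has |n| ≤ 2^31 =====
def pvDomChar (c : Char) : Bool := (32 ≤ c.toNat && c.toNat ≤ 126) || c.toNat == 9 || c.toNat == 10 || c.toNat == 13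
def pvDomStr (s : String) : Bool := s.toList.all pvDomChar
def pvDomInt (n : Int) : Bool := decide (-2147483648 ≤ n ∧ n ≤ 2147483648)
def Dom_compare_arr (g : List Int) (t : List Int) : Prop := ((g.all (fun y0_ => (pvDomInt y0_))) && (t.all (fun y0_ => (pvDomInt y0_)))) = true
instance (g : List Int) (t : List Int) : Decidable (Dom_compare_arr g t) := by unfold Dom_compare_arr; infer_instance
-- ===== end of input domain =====

-- B replaces A's hash-membership filter by a sort-then-merge two-pointer scan counting common distinct elements; alternative algorithm, similar cost.

-- ===== PORT A =====
def compare_arr (g : List Int) (t : List Int) : String :=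
  let t_set : PySem.Set Int := PySem.Set.ofList t
  let overlap : List Int := g.filter (fun x => PySem.Set.contains t_set x)
  if overlap.length == t.length && g.length == t.length then "exact"
  else if !overlap.isEmpty then "partial"
  else "none"

-- ===== PORT B =====
-- the while loop over indices i, j becomes the obvious structural recursion over the two sorted lists
def mergeCommon : List Int → List Int → Nat
  | [], _ => 0
  | _ :: _, [] => 0
  | x :: xs, y :: ys =>
    if x < y then mergeCommon xs (y :: ys)
    else if y < x then mergeCommon (x :: xs) ys
    else 1 + mergeCommon xs ys

def compare_arr_alt (g : List Int) (t : List Int) : String :=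
  let gs : List Int := PySem.List.sorted (PySem.Set.ofList g) (fun x => x) false
  let ts : List Int := PySem.List.sorted (PySem.Set.ofList t) (fun x => x) false
  let common : Nat := mergeCommon gs ts
  if g.length == t.length && common == gs.length then "exact"
  else if common > 0 then "partial"
  else "none"

-- ===== PRECONDITION & SPEC =====
def Spec_compare_arr (g : List Int) (t : List Int) (out : String) : Prop := out = compare_arr_alt g t
instance (g : List Int) (t : List Int) (out : String) : Decidable (Spec_compare_arr g t out) := by unfold Spec_compare_arr; infer_instance

-- ===== CLAIM (what is proved, stated in full; the proofs are below) =====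
def Claim_equal_compare_arr : Prop := ∀ (g : List Int) (t : List Int), Dom_compare_arr g t → Spec_compare_arr g t (compare_arr g t)

-- ===== LEMMAS AND PROOFS =====

-- On strictly increasing lists, the merge walk counts exactly the elements of xs that occur in ys.
theorem mergeCommon_eq_filter_length (xs ys : List Int)
    (hx : xs.Pairwise (· < ·)) (hy : ys.Pairwise (· < ·)) :
    mergeCommon xs ys = (xs.filter (fun x => decide (x ∈ ys))).length := by
  induction xs, ys using mergeCommon.induct with
  | case1 ys => simp [mergeCommon]
  | case2 x xs => simp [mergeCommon]
  | case3 x xs y ys h1 ih =>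
    rcases List.pairwise_cons.mp hx with ⟨hxall, hx'⟩
    rcases List.pairwise_cons.mp hy with ⟨hyall, hy'⟩
    have hne : ¬ x = y := by intro e; subst e; exact lt_irrefl x h1
    have hnin : x ∉ ys := fun hm => absurd (h1.trans (hyall _ hm)) (lt_irrefl x)
    simp only [mergeCommon, if_pos h1]
    rw [ih hx' hy]
    simp [hne, hnin]
  | case4 x xs y ys h1 h2 ih =>
    rcases List.pairwise_cons.mp hx with ⟨hxall, hx'⟩
    rcases List.pairwise_cons.mp hy with ⟨hyall, hy'⟩
    simp only [mergeCommon, if_neg h1, if_pos h2]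
    rw [ih hx hy']
    congr 1
    apply List.filter_congr
    intro z hz
    have hyz : y < z := by
      rcases List.mem_cons.mp hz with rfl | hm
      · exact h2
      · exact h2.trans (hxall _ hm)
    simp only [decide_eq_decide, List.mem_cons]
    exact Iff.intro Or.inr (fun h => Or.resolve_left h (fun e => absurd (e ▸ hyz) (lt_irrefl y)))
  | case5 x xs y ys h1 h2 ih =>
    rcases List.pairwise_cons.mp hx with ⟨hxall, hx'⟩
    rcases List.pairwise_cons.mp hy with ⟨hyall, hy'⟩
    have hxy : x = y := le_antisymm (not_lt.mp h2) (not_lt.mp h1)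
    subst hxy
    have hstep : List.filter (fun z => decide (z = x) || decide (z ∈ ys)) xs
        = List.filter (fun z => decide (z ∈ ys)) xs := by
      apply List.filter_congr
      intro z hz
      have hxz : x < z := hxall z hz
      have hne : z ≠ x := by intro e; subst e; exact lt_irrefl z hxz
      simp [hne]
    simp only [mergeCommon, if_neg h1]
    rw [ih hx' hy', List.filter_cons]
    simp [hstep]
    omega

theorem mergeCommon_sets (g t : List Int) :
    mergeCommon (PySem.List.sorted (PySem.Set.ofList g) (fun x => x) false)
                (PySem.List.sorted (PySem.Set.ofList t) (fun x => x) false)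
    = ((PySem.List.sorted (PySem.Set.ofList g) (fun x => x) false).filter
        (fun x => decide (x ∈ t))).length := by
  rw [mergeCommon_eq_filter_length _ _ (PySem.List.sorted_ofList_pairwise_lt g)
        (PySem.List.sorted_ofList_pairwise_lt t)]
  congr 1
  apply List.filter_congr
  intro z _
  simp [PySem.List.mem_sorted, PySem.Set.mem_ofList]

-- ===== VERDICT (by name: the statement is the Claim_ definition above) =====
theorem compare_arr_spec : Claim_equal_compare_arr := by
  intro g t _
  show compare_arr g t = compare_arr_alt g t
  simp only [compare_arr, compare_arr_alt, mergeCommon_sets]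
  set gs := PySem.List.sorted (PySem.Set.ofList g) (fun x => x) false with hgs
  -- the two branch conditions of A and B coincide
  have hmemgs : ∀ z : Int, z ∈ gs ↔ z ∈ g := by
    intro z; rw [hgs]; simp [PySem.List.mem_sorted, PySem.Set.mem_ofList]
  have hcond1 : (((g.filter (fun x => PySem.Set.contains (PySem.Set.ofList t) x)).length == t.length)
      && (g.length == t.length))
      = ((g.length == t.length) && ((gs.filter (fun x => decide (x ∈ t))).length == gs.length)) := by
    by_cases h : g.length = t.length
    · simp only [h, beq_self_eq_true, Bool.and_true, Bool.true_and]
      rw [Bool.eq_iff_iff]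
      simp only [beq_iff_eq, ← h, List.length_filter_eq_length_iff]
      constructor
      · intro hall z hz
        have := hall z ((hmemgs z).mp hz)
        simpa [PySem.Set.contains_iff, PySem.Set.mem_ofList] using this
      · intro hall z hz
        have := hall z ((hmemgs z).mpr hz)
        simpa [PySem.Set.contains_iff, PySem.Set.mem_ofList] using this
    · have hb : (g.length == t.length) = false := by simp [h]
      simp [hb]
  have hcond2 : (g.filter (fun x => PySem.Set.contains (PySem.Set.ofList t) x)).isEmpty
      = decide ¬ ((gs.filter (fun x => decide (x ∈ t))).length > 0) := by
    rw [Bool.eq_iff_iff]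
    simp only [List.isEmpty_iff, List.eq_nil_iff_forall_not_mem, List.mem_filter,
      decide_eq_true_eq, not_lt, Nat.le_zero, List.length_eq_zero_iff,
      List.eq_nil_iff_forall_not_mem, PySem.Set.contains_iff, PySem.Set.mem_ofList]
    constructor
    · intro h z hz
      rcases hz with ⟨hz1, hz2⟩
      exact h z ⟨(hmemgs z).mp hz1, by simpa using hz2⟩
    · intro h z hz
      rcases hz with ⟨hz1, hz2⟩
      exact h z ⟨(hmemgs z).mpr hz1, by simpa using hz2⟩
  rw [hcond1, hcond2]
  by_cases hc : ((g.length == t.length) && ((gs.filter (fun x => decide (x ∈ t))).length == gs.length)) = true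
  · simp [hc]
  · simp only [Bool.not_eq_true] at hc
    by_cases hp : (gs.filter (fun x => decide (x ∈ t))).length > 0
    · simp [hc, hp]
    · simp [hc, hp]
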